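-- pv_equiv track=rewrite | github.com/beatriz-antunes-ku/Thesis | Code/PAE_heatmap.py | calculate_chain_lengths
-- ===== SOURCE A (Python) =====
-- def calculate_chain_lengths(token_res_ids):
--     chain_lengths = []
--     current_chain_length = 1  # Initialize with 1 to account for the first residue
--     previous_residue = token_res_ids[0]
--
--     for residue in token_res_ids[1:]:
--         if residue == previous_residue + 1:
--             current_chain_length += 1
--         else:
--             chain_lengths.append(current_chain_length)
--             current_chain_length = 1
--         previous_residue = residue
--
--     # Add length of the last chain
--     chain_lengths.append(current_chain_length)
--
--     return chain_lengths
-- ===== SOURCE B (Python) =====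
-- def calculate_chain_lengths(token_res_ids):
--     n = len(token_res_ids)
--     breaks = [i + 1
--               for i, (a, b) in enumerate(zip(token_res_ids, token_res_ids[1:]))
--               if b != a + 1]
--     bounds = [0] + breaks + [n]
--     return [q - p for p, q in zip(bounds, bounds[1:])]
-- ===== Notes on version B (the rewrite author's own statement) =====
-- stated objective: alternative
-- what changed: B replaces A's running-counter loop by a boundary decomposition: it collects the chain-break positions with enumerate/zip over consecutive pairs, frames them with 0 and len, and returns adjacent differences of that boundary list.
import Mathlib
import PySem

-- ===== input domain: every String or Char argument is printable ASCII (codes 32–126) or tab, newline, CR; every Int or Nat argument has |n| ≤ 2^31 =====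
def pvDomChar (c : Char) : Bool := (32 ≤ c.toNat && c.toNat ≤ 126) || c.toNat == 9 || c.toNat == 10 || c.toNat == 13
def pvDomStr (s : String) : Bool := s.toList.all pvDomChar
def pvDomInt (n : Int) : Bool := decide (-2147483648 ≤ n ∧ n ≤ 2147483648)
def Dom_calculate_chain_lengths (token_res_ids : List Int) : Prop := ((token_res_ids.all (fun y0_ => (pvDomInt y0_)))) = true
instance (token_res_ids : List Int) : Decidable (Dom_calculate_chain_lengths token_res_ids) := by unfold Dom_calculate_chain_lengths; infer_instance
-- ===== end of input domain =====

-- B replaces A's running-counter loop by a boundary decomposition (break positions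
-- framed by 0 and len, then adjacent differences); same O(n) cost, different structure.

-- ===== PORT A =====
-- A: running counter over token_res_ids[1:], appending on each break and at the end.
def calculate_chain_lengths (token_res_ids : List Int) : List Int :=
  -- token_res_ids[0] raises IndexError on []: excluded by Pre_; default never used inside Pre_
  let previous_residue : Int := (PySem.List.pyGet? token_res_ids 0).getD 0
  let st := (PySem.List.slice token_res_ids (some 1) none).foldl
    (fun (s : List Int × Int × Int) residue =>
      if residue = s.2.2 + 1 then (s.1, s.2.1 + 1, residue)
      else (s.1 ++ [s.2.1], 1, residue))
    ([], 1, previous_residue)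
  st.1 ++ [st.2.1]

-- ===== PORT B =====
-- B: break positions via enumerate/zip of consecutive pairs; adjacent differences of [0]+breaks+[n].
def calculate_chain_lengths_alt (token_res_ids : List Int) : List Int :=
  let n : Int := token_res_ids.length
  let breaks : List Int :=
    ((PySem.List.enumerate (token_res_ids.zip (PySem.List.slice token_res_ids (some 1) none))).filter
      (fun p => p.2.2 ≠ p.2.1 + 1)).map (fun p => p.1 + 1)
  let bounds : List Int := 0 :: breaks ++ [n]
  (bounds.zip (PySem.List.slice bounds (some 1) none)).map (fun pq => pq.2 - pq.1)

-- ===== PRECONDITION & SPEC =====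
-- A raises IndexError (token_res_ids[0]) on the empty list; Pre_ excludes exactly that input.
def Pre_calculate_chain_lengths (token_res_ids : List Int) : Prop := token_res_ids ≠ []
instance (token_res_ids : List Int) : Decidable (Pre_calculate_chain_lengths token_res_ids) := by unfold Pre_calculate_chain_lengths; infer_instance
def pvWitness_calculate_chain_lengths : List Int := [1, 2, 3, 7, 8, 1]
def Spec_calculate_chain_lengths (token_res_ids : List Int) (out : List Int) : Prop := out = calculate_chain_lengths_alt token_res_ids
instance (token_res_ids : List Int) (out : List Int) : Decidable (Spec_calculate_chain_lengths token_res_ids out) := by unfold Spec_calculate_chain_lengths; infer_instance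

-- ===== CLAIM (what is proved, stated in full; the proofs are below) =====
def Claim_equal_calculate_chain_lengths : Prop := ∀ (token_res_ids : List Int), Dom_calculate_chain_lengths token_res_ids → Pre_calculate_chain_lengths token_res_ids → Spec_calculate_chain_lengths token_res_ids (calculate_chain_lengths token_res_ids)

-- ===== LEMMAS AND PROOFS =====

-- canonical run-length recursion shared by both proofs
def pvRuns (cur prev : Int) : List Int → List Int
  | [] => [cur]
  | y :: l => if y = prev + 1 then pvRuns (cur + 1) y l else cur :: pvRuns 1 y l

-- break positions b, b+1, … relative to prev
def pvBrk (b prev : Int) : List Int → List Int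
  | [] => []
  | y :: l => if y = prev + 1 then pvBrk (b + 1) y l else b :: pvBrk (b + 1) y l

lemma foldlA_eq (l : List Int) : ∀ (acc : List Int) (cur prev : Int),
    (l.foldl
        (fun (s : List Int × Int × Int) residue =>
          if residue = s.2.2 + 1 then (s.1, s.2.1 + 1, residue)
          else (s.1 ++ [s.2.1], 1, residue)) (acc, cur, prev)).1 ++
      [(l.foldl
        (fun (s : List Int × Int × Int) residue =>
          if residue = s.2.2 + 1 then (s.1, s.2.1 + 1, residue)
          else (s.1 ++ [s.2.1], 1, residue)) (acc, cur, prev)).2.1] = acc ++ pvRuns cur prev l := by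
  induction l with
  | nil => intro acc cur prev; simp [pvRuns]
  | cons y l ih =>
    intro acc cur prev
    by_cases h : y = prev + 1
    · simp [List.foldl, h, pvRuns, ih]
    · have := ih (acc ++ [cur]) 1 y
      simp [List.foldl, h, pvRuns, this]

lemma breaks_eq (l : List Int) : ∀ (prev b : Int),
    ((PySem.List.enumerate ((prev :: l).zip l) b).filter
      (fun p => p.2.2 ≠ p.2.1 + 1)).map (fun p => p.1 + 1) = pvBrk (b + 1) prev l := by
  induction l with
  | nil => intro prev b; simp [pvBrk]
  | cons y l ih =>
    intro prev b
    by_cases h : y = prev + 1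
    · simpa [List.zip_cons_cons, PySem.List.enumerate_cons, h, pvBrk] using ih y (b + 1)
    · simpa [List.zip_cons_cons, PySem.List.enumerate_cons, h, pvBrk] using ih y (b + 1)

lemma diffs_eq (l : List Int) : ∀ (prev b p : Int),
    ((p :: pvBrk b prev l ++ [b + (l.length : Int)]).zip
        ((p :: pvBrk b prev l ++ [b + (l.length : Int)]).drop 1)).map
      (fun pq => pq.2 - pq.1) = pvRuns (b - p) prev l := by
  induction l with
  | nil => intro prev b p; simp [pvBrk, pvRuns]
  | cons y l ih =>
    intro prev b p
    by_cases h : y = prev + 1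
    · subst h
      have hih := ih (prev + 1) (b + 1) p
      have e1 : b + 1 - p = b - p + 1 := by ring
      have e2 : (b + 1) + (l.length : Int) = b + ((l.length : Int) + 1) := by ring
      rw [e1, e2] at hih
      simpa [pvBrk, pvRuns] using hih
    · have hih := ih y (b + 1) b
      have e2 : (b + 1) + (l.length : Int) = b + ((l.length : Int) + 1) := by ring
      have e3 : b + 1 - b = (1 : Int) := by ring
      rw [e2, e3] at hih
      simpa [pvBrk, pvRuns, h, List.zip_cons_cons] using congrArg (List.cons (b - p)) hih

theorem calculate_chain_lengths_spec_aux (x : Int) (t : List Int) :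
    calculate_chain_lengths (x :: t) = calculate_chain_lengths_alt (x :: t) := by
  unfold calculate_chain_lengths calculate_chain_lengths_alt
  simp only [PySem.List.slice_from_one, List.tail_cons]
  have hA : (PySem.List.pyGet? (x :: t) 0).getD 0 = x := by
    simp [PySem.List.pyGet?, PySem.List.pyIdx?]
  rw [hA, foldlA_eq t [] 1 x, breaks_eq t x 0]
  have hb := diffs_eq t x 1 0
  rw [show (1 : Int) - 0 = 1 by ring] at hb
  rw [show (0 : Int) + 1 = 1 by ring]
  have hlen : ((x :: t).length : Int) = 1 + (t.length : Int) := by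
    simp [List.length_cons]; ring
  simp only [hlen, List.nil_append] at hb ⊢
  exact hb.symm

-- ===== VERDICT (by name: the statement is the Claim_ definition above) =====
theorem calculate_chain_lengths_spec : Claim_equal_calculate_chain_lengths := by
  intro xs _ hpre
  unfold Spec_calculate_chain_lengths
  cases xs with
  | nil => exact absurd rfl hpre
  | cons x t => exact calculate_chain_lengths_spec_aux x t
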